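-- pv_equiv track=rewrite | github.com/melvilsky/MidjourneyAutoDiscord | discord_print.py | get_max_allowed_number
-- ===== SOURCE A (Python) =====
-- def get_max_allowed_number(message_repeat_count):
--     """
--     Возвращает максимальное число (от 1 до 10), которое можно вводить
--     заданное количество раз message_repeat_count.
--
--     :param message_repeat_count: Количество ввода строки
--     :return: Максимальное допустимое число
--     """
--
--     # Определяем правила максимального количества повторений для каждого числа
--     def repeats_for_number(number):
--         if number == 1:
--             return 10
--         elif number == 2:
--             return 5
--         elif number == 3:
--             return 3
--         elif number in [4, 5]:
--             return 2
--         else:  # Для чисел 6–10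
--             return 1
--
--     # Ищем максимальное число, которое удовлетворяет условию
--     for number in range(10, 0, -1):  # Проверяем числа от 10 до 1
--         if message_repeat_count <= repeats_for_number(number):
--             return number
--
--     return None  # Если ничего не найдено (на случай некорректного ввода)
-- ===== SOURCE B (Python) =====
-- def get_max_allowed_number(message_repeat_count):
--     if message_repeat_count <= 1:
--         return 10
--     elif message_repeat_count <= 2:
--         return 5
--     elif message_repeat_count <= 3:
--         return 3
--     elif message_repeat_count <= 5:
--         return 2
--     elif message_repeat_count <= 10:
--         return 1
--     return None
-- ===== Notes on version B (the rewrite author's own statement) =====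
-- stated objective: simpler
-- what changed: Replaced the 10..1 scan with its inner repeats_for_number helper by a direct cascading threshold comparison on message_repeat_count.
import Mathlib
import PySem

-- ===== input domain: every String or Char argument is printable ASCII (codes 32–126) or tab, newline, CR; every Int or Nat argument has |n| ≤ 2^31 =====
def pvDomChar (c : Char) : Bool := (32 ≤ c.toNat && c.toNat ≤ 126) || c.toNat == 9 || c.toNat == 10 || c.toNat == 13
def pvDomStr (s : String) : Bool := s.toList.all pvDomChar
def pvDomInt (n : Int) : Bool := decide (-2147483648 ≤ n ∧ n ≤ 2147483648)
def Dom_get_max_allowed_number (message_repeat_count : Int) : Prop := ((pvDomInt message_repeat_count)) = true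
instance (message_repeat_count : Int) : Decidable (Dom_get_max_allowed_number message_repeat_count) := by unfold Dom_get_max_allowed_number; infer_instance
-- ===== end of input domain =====

-- B replaces A's 10..1 scan with a direct cascading threshold conditional (simpler).

-- ===== PORT A =====
-- inner helper repeats_for_number
def pvRepeatsForNumber (number : Int) : Int :=
  if number == 1 then 10
  else if number == 2 then 5
  else if number == 3 then 3
  else if number ∈ [(4 : Int), 5] then 2
  else 1

-- the for-loop over range(10, 0, -1) with early return
def pvScanLoop (message_repeat_count : Int) : List Int → Option Int
  | [] => none
  | number :: rest =>
      if message_repeat_count ≤ pvRepeatsForNumber number then some number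
      else pvScanLoop message_repeat_count rest

def get_max_allowed_number (message_repeat_count : Int) : Option Int :=
  pvScanLoop message_repeat_count (PySem.List.pyRange 10 0 (-1))

-- ===== PORT B =====
def get_max_allowed_number_alt (message_repeat_count : Int) : Option Int :=
  if message_repeat_count ≤ 1 then some 10
  else if message_repeat_count ≤ 2 then some 5
  else if message_repeat_count ≤ 3 then some 3
  else if message_repeat_count ≤ 5 then some 2
  else if message_repeat_count ≤ 10 then some 1
  else none

-- ===== PRECONDITION & SPEC =====
def Spec_get_max_allowed_number (message_repeat_count : Int) (out : Option Int) : Prop := out = get_max_allowed_number_alt message_repeat_count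
instance (message_repeat_count : Int) (out : Option Int) : Decidable (Spec_get_max_allowed_number message_repeat_count out) := by unfold Spec_get_max_allowed_number; infer_instance

-- ===== CLAIM (what is proved, stated in full; the proofs are below) =====
def Claim_equal_get_max_allowed_number : Prop := ∀ (message_repeat_count : Int), Dom_get_max_allowed_number message_repeat_count → Spec_get_max_allowed_number message_repeat_count (get_max_allowed_number message_repeat_count)

-- ===== LEMMAS AND PROOFS =====
theorem pyRange_10_down : PySem.List.pyRange 10 0 (-1) = [10, 9, 8, 7, 6, 5, 4, 3, 2, 1] := by decide

-- ===== VERDICT (by name: the statement is the Claim_ definition above) =====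
theorem get_max_allowed_number_spec : Claim_equal_get_max_allowed_number := by
  intro r _
  unfold Spec_get_max_allowed_number get_max_allowed_number get_max_allowed_number_alt
  rw [pyRange_10_down]
  simp only [pvScanLoop, pvRepeatsForNumber]
  norm_num
  split_ifs <;> first | rfl | (exfalso; omega)
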